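-- pv_equiv track=rewrite | github.com/TextNest/PandDF_ManuAITalk | Backend/module/doc_converter/pdf_converter.py | cal_page_size
-- ===== SOURCE A (Python) =====
-- def align_to_even(value):
--     return value+1 if value%2 != 0 else value
--
-- def cal_page_size(value,grid):
--     v = value
--     g = grid
--     if g>1:
--         v = value//2
--         g = grid//2
--         if g>1:
--             v = align_to_even(v)
--             v = cal_page_size(v,g)
--     return v
-- ===== SOURCE B (Python) =====
-- def align_to_even(value):
--     return value+1 if value%2 != 0 else value
--
-- def cal_page_size(value, grid):
--     # Iterative level-by-level halving instead of tail recursion.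
--     v = value
--     g = grid
--     while g > 1:
--         v = v // 2
--         g = g // 2
--         if g > 1:
--             v = align_to_even(v)
--     return v
-- ===== Notes on version B (the rewrite author's own statement) =====
-- stated objective: simpler
-- what changed: Replaced the tail recursion of cal_page_size by an explicit iterative while-loop over the state (v, g), halving level by level and aligning to even only when another level follows.
import Mathlib
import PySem

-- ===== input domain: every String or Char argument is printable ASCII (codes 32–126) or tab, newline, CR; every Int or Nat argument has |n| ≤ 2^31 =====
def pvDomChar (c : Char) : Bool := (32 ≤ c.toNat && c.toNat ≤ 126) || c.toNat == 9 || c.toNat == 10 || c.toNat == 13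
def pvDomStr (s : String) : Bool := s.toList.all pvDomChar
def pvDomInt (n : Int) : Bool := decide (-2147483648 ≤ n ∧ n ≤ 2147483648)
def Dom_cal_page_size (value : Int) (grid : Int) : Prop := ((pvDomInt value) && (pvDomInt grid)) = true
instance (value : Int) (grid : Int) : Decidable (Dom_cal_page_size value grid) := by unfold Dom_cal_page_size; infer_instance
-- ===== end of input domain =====

-- B replaces A's tail recursion by an explicit iterative loop over (v, g); same values, same cost.
-- termination measure lemma, cited by both ports' decreasing_by
theorem pvHalveLt (g : Int) (h : g > 1) : (PySem.Int.floordiv g 2).toNat < g.toNat := by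
  simp only [PySem.Int.floordiv, Int.fdiv_eq_ediv]
  omega

-- ===== PORT A =====
def align_to_even (value : Int) : Int :=
  if PySem.Int.mod value 2 ≠ 0 then value + 1 else value

def cal_page_size (value : Int) (grid : Int) : Int :=
  if _h : grid > 1 then
    let v := PySem.Int.floordiv value 2
    let g := PySem.Int.floordiv grid 2
    if g > 1 then cal_page_size (align_to_even v) g else v
  else value
termination_by grid.toNat
decreasing_by
  exact pvHalveLt grid _h

-- ===== PORT B =====
-- the while loop of Source B, as a tail-recursive helper on the loop state (v, g)
def calPageLoop (v : Int) (g : Int) : Int :=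
  if _h : g > 1 then
    let v' := PySem.Int.floordiv v 2
    let g' := PySem.Int.floordiv g 2
    calPageLoop (if g' > 1 then align_to_even v' else v') g'
  else v
termination_by g.toNat
decreasing_by
  exact pvHalveLt g _h

def cal_page_size_alt (value : Int) (grid : Int) : Int :=
  calPageLoop value grid

-- ===== PRECONDITION & SPEC =====
def Spec_cal_page_size (value : Int) (grid : Int) (out : Int) : Prop := out = cal_page_size_alt value grid
instance (value : Int) (grid : Int) (out : Int) : Decidable (Spec_cal_page_size value grid out) := by unfold Spec_cal_page_size; infer_instance

-- ===== CLAIM (what is proved, stated in full; the proofs are below) =====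
def Claim_equal_cal_page_size : Prop := ∀ (value : Int) (grid : Int), Dom_cal_page_size value grid → Spec_cal_page_size value grid (cal_page_size value grid)

-- ===== LEMMAS AND PROOFS =====

-- ===== VERDICT (by name: the statement is the Claim_ definition above) =====
-- the recursion of A and the loop of B unfold in lockstep; induction on g.toNat
theorem calPageLoop_eq (value grid : Int) : cal_page_size value grid = calPageLoop value grid := by
  by_cases h : grid > 1
  · by_cases h2 : PySem.Int.floordiv grid 2 > 1
    · rw [cal_page_size.eq_def, calPageLoop.eq_def]
      simp only [dif_pos h, if_pos h2]
      exact calPageLoop_eq (align_to_even (PySem.Int.floordiv value 2)) (PySem.Int.floordiv grid 2)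
    · rw [cal_page_size.eq_def, calPageLoop.eq_def]
      simp only [dif_pos h, if_neg h2]
      rw [calPageLoop.eq_def]
      simp only [dif_neg h2]
  · rw [cal_page_size.eq_def, calPageLoop.eq_def]
    simp only [dif_neg h]
termination_by grid.toNat
decreasing_by
  exact pvHalveLt grid h

theorem cal_page_size_spec : Claim_equal_cal_page_size := by
  intro value grid _
  unfold Spec_cal_page_size cal_page_size_alt
  exact calPageLoop_eq value grid
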